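-- pv_equiv track=rewrite | github.com/kirillbk/yandex-algorithm-training | 3AB/final/d.py | check_diameter
-- ===== SOURCE A (Python) =====
-- def check_diameter(d: int, graph: list[int], n: int) -> bool:
--     def dfs(v: int, visited: list[bool]):
--         visited[v] = True
--         for to in range(n + 2):
--             if  not visited[to] and graph[v][to] != 0 and graph[v][to] < d:
--                 dfs(to, visited)
--
--     visited = [False] * (n + 2)
--     dfs(n, visited)
--
--     return not visited[n + 1]
-- ===== SOURCE B (Python) =====
-- def check_diameter(d: int, graph: list[int], n: int) -> bool:
--     size = n + 2
--     seen = [False] * size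
--     seen[n] = True
--     frontier = [n]
--     while frontier:
--         nxt = []
--         for v in frontier:
--             for to in range(size):
--                 if not seen[to] and graph[v][to] != 0 and graph[v][to] < d:
--                     seen[to] = True
--                     nxt.append(to)
--         frontier = nxt
--     return not seen[n + 1]
-- ===== Notes on version B (the rewrite author's own statement) =====
-- stated objective: alternative
-- what changed: A's recursive DFS (call stack, mark-on-entry) is replaced by a level-by-level BFS: a frontier list is expanded into the next level each round, nodes are marked when first discovered, and the (seen, next-frontier) pair is threaded through nested loops instead of recursion.
-- outside the precondition, e.g. on check_diameter(10, [[9], [0, 0, 5], [0, 0, 0]], 1): A returns False, B returns False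
import Mathlib
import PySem

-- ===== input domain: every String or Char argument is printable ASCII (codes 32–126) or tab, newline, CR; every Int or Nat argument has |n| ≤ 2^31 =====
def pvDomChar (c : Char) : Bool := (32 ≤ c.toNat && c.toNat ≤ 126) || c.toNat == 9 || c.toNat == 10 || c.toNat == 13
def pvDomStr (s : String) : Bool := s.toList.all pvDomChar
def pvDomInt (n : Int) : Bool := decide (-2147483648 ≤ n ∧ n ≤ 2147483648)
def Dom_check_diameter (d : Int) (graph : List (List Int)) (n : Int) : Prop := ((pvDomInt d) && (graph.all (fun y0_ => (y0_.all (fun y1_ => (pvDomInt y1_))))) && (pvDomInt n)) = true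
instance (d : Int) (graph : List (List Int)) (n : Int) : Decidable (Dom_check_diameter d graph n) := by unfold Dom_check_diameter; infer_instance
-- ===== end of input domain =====

-- B replaces A's recursive DFS by a level-by-level BFS over frontier lists (mark on discovery); return value only.

-- ===== PORT A =====
-- recursive dfs of A; fuel bounds the recursion depth (each call marks a fresh node), otherwise step-for-step
def dfsA (d : Int) (graph : List (List Int)) (N : Nat) : Nat → Nat → List Bool → List Bool
  | 0, _, vis => vis
  | f + 1, v, vis =>
    (List.range N).foldl
      (fun vis tt =>
        if vis.getD tt false = false ∧ (graph.getD v []).getD tt 0 ≠ 0 ∧ (graph.getD v []).getD tt 0 < d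
        then dfsA d graph N f tt vis else vis)
      (vis.set v true)

def check_diameter (d : Int) (graph : List (List Int)) (n : Int) : Bool :=
  let N := (n + 2).toNat
  let vis := dfsA d graph N (N + 1) n.toNat (List.replicate N false)
  !(vis.getD (n + 1).toNat false)

-- ===== PORT B =====
-- one BFS level of Source B: fold over the frontier and, inside, over range N, threading the (seen, nxt) pair
def bfsLevel (d : Int) (graph : List (List Int)) (N : Nat) (frontier : List Nat) (seen : List Bool) :
    List Bool × List Nat :=
  frontier.foldl
    (fun st v =>
      (List.range N).foldl
        (fun st tt =>
          if st.1.getD tt false = false ∧ (graph.getD v []).getD tt 0 ≠ 0 ∧ (graph.getD v []).getD tt 0 < d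
          then (st.1.set tt true, st.2 ++ [tt]) else st)
        st)
    (seen, [])

-- the while-loop of Source B: fuel bounds the number of levels
def bfsLoop (d : Int) (graph : List (List Int)) (N : Nat) : Nat → List Bool → List Nat → List Bool
  | 0, seen, _ => seen
  | f + 1, seen, frontier =>
    if frontier.isEmpty then seen
    else
      let st := bfsLevel d graph N frontier seen
      bfsLoop d graph N f st.1 st.2

def check_diameter_alt (d : Int) (graph : List (List Int)) (n : Int) : Bool :=
  let N := (n + 2).toNat
  let seen0 := (List.replicate N false).set n.toNat true
  !(bfsLoop d graph N (N + 1) seen0 [n.toNat]).getD (n + 1).toNat false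

-- ===== PRECONDITION & SPEC =====
-- Pre_ admits n = -1 (the loop touches no graph entry), or n ≥ 0 with a full (n+2)-row leading matrix,
-- or n ≥ 0 with the start row present but carrying no edge of nonzero weight < d; outside these A raises
-- IndexError on most inputs, and where it still returns it is only because the ragged parts of graph
-- happen to be unreachable.
def Pre_check_diameter (d : Int) (graph : List (List Int)) (n : Int) : Prop :=
  n = -1 ∨
  (0 ≤ n ∧ ((n + 2).toNat ≤ graph.length ∧ ∀ row ∈ graph.take (n + 2).toNat, (n + 2).toNat ≤ row.length)) ∨
  (0 ≤ n ∧ n.toNat < graph.length ∧ (n + 2).toNat ≤ (graph.getD n.toNat []).length ∧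
    ∀ i < (n + 2).toNat, i ≠ n.toNat →
      ((graph.getD n.toNat []).getD i 0 = 0 ∨ d ≤ (graph.getD n.toNat []).getD i 0))
instance (d : Int) (graph : List (List Int)) (n : Int) : Decidable (Pre_check_diameter d graph n) := by
  unfold Pre_check_diameter; infer_instance

def pvWitness_check_diameter : Int × List (List Int) × Int := (2, [[0, 1], [1, 0]], 0)

def Spec_check_diameter (d : Int) (graph : List (List Int)) (n : Int) (out : Bool) : Prop := out = check_diameter_alt d graph n
instance (d : Int) (graph : List (List Int)) (n : Int) (out : Bool) : Decidable (Spec_check_diameter d graph n out) := by unfold Spec_check_diameter; infer_instance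

-- ===== CLAIM (what is proved, stated in full; the proofs are below) =====
def Claim_equal_check_diameter : Prop := ∀ (d : Int) (graph : List (List Int)) (n : Int), Dom_check_diameter d graph n → Pre_check_diameter d graph n → Spec_check_diameter d graph n (check_diameter d graph n)

-- ===== LEMMAS AND PROOFS =====

-- reachability from s through edges of weight ≠ 0 and < d, restricted to nodes < N
inductive Reach (d : Int) (graph : List (List Int)) (N s : Nat) : Nat → Prop
  | base : Reach d graph N s s
  | step {v tt : Nat} : Reach d graph N s v → tt < N →
      (graph.getD v []).getD tt 0 ≠ 0 → (graph.getD v []).getD tt 0 < d → Reach d graph N s tt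

-- the edge condition of both programs, as a proof-side abbreviation
def Elig (d : Int) (graph : List (List Int)) (v tt : Nat) : Prop :=
  (graph.getD v []).getD tt 0 ≠ 0 ∧ (graph.getD v []).getD tt 0 < d

-- the inner-loop body of bfsLevel, named for the proofs
def stepB (d : Int) (graph : List (List Int)) (v : Nat) (st : List Bool × List Nat) (tt : Nat) :
    List Bool × List Nat :=
  if st.1.getD tt false = false ∧ (graph.getD v []).getD tt 0 ≠ 0 ∧ (graph.getD v []).getD tt 0 < d
  then (st.1.set tt true, st.2 ++ [tt]) else st

theorem bfsLevel_eq (d : Int) (graph : List (List Int)) (N : Nat) (fr : List Nat) (seen : List Bool) :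
    bfsLevel d graph N fr seen =
      fr.foldl (fun st v => (List.range N).foldl (stepB d graph v) st) (seen, []) := rfl

theorem getD_set_self (vis : List Bool) (v : Nat) (b : Bool) (h : v < vis.length) :
    (vis.set v b).getD v false = b := by
  simp [List.getD, List.getElem?_set_self, h]

theorem getD_set_ne (vis : List Bool) (v i : Nat) (b : Bool) (h : i ≠ v) :
    (vis.set v b).getD i false = vis.getD i false := by
  simp [List.getD, List.getElem?_set_ne (Ne.symm h)]

theorem getD_replicate_false (N i : Nat) : (List.replicate N false).getD i false = false := by
  induction N generalizing i with
  | zero => simp [List.getD]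
  | succ m ih =>
    cases i with
    | zero => simp [List.replicate]
    | succ j => simpa [List.replicate] using ih j

theorem count_false_pos (vis : List Bool) (v : Nat) (hv : v < vis.length)
    (hf : vis.getD v false = false) : 0 < vis.count false := by
  induction vis generalizing v with
  | nil => simp at hv
  | cons a l ih =>
    cases v with
    | zero =>
      simp [List.getD] at hf
      subst hf
      simp [List.count_cons]
    | succ j =>
      have h1 := ih j (by simpa using hv) (by simpa [List.getD] using hf)
      have h2 : l.count false ≤ (a :: l).count false := by
        rw [List.count_cons]; omega
      omega

theorem count_false_set (vis : List Bool) (v : Nat) (hv : v < vis.length)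
    (hf : vis.getD v false = false) :
    (vis.set v true).count false + 1 = vis.count false := by
  induction vis generalizing v with
  | nil => simp at hv
  | cons a l ih =>
    cases v with
    | zero =>
      simp [List.getD] at hf
      simp [List.count_cons, hf]
    | succ j =>
      have := ih j (by simpa using hv) (by simpa [List.getD] using hf)
      cases a <;> simp [List.count_cons] <;> omega

theorem count_false_mono (vis vis' : List Bool) (hl : vis.length = vis'.length)
    (hm : ∀ i, vis.getD i false = true → vis'.getD i false = true) :
    vis'.count false ≤ vis.count false := by
  induction vis generalizing vis' with
  | nil => cases vis' with
    | nil => simp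
    | cons b l' => simp at hl
  | cons a l ih =>
    cases vis' with
    | nil => simp at hl
    | cons b l' =>
      have htail : l'.count false ≤ l.count false := by
        refine ih l' (by simpa using hl) ?_
        intro i hi
        have := hm (i + 1)
        simpa [List.getD] using this (by simpa [List.getD] using hi)
      have hhead := hm 0
      simp [List.getD] at hhead
      cases a with
      | false => cases b <;> simp [List.count_cons] <;> omega
      | true =>
        have hb := hhead rfl
        subst hb
        simp [List.count_cons]
        omega

theorem count_false_strict (vis vis' : List Bool) (hl : vis.length = vis'.length)
    (hm : ∀ i, vis.getD i false = true → vis'.getD i false = true)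
    (u : Nat) (hu : u < vis.length) (h0 : vis.getD u false = false)
    (h1 : vis'.getD u false = true) :
    vis'.count false < vis.count false := by
  have hm2 : ∀ i, (vis.set u true).getD i false = true → vis'.getD i false = true := by
    intro i hi
    by_cases hiu : i = u
    · subst hiu; exact h1
    · exact hm i (by rwa [getD_set_ne vis u i true hiu] at hi)
  have hle := count_false_mono (vis.set u true) vis' (by simpa using hl) hm2
  have := count_false_set vis u hu h0
  omega

-- specification of A's dfs: its visited list grows, marks exactly reachable nodes, and is edge-closed on the new marks
theorem dfsA_spec (d : Int) (graph : List (List Int)) (N s : Nat) :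
    ∀ (f v : Nat) (vis : List Bool),
      vis.length = N → v < N → vis.getD v false = false →
      vis.count false ≤ f → Reach d graph N s v →
      (dfsA d graph N f v vis).length = N ∧
      (∀ i, vis.getD i false = true → (dfsA d graph N f v vis).getD i false = true) ∧
      (∀ u, (dfsA d graph N f v vis).getD u false = true →
          vis.getD u false = true ∨ Reach d graph N s u) ∧
      (∀ u, (dfsA d graph N f v vis).getD u false = true → vis.getD u false = false →
          ∀ tt, tt < N → (graph.getD u []).getD tt 0 ≠ 0 → (graph.getD u []).getD tt 0 < d →
            (dfsA d graph N f v vis).getD tt false = true) ∧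
      (dfsA d graph N f v vis).getD v false = true := by
  intro f
  induction f with
  | zero =>
    intro v vis hl hv hf hc _
    exact absurd hc (by have := count_false_pos vis v (hl ▸ hv) hf; omega)
  | succ f ih =>
    intro v vis hl hv hfalse hc hr
    have hvlen : v < vis.length := hl ▸ hv
    have fold :
        ∀ (ts : List Nat) (vis1 : List Bool),
          (∀ t ∈ ts, t < N) → vis1.length = N → vis1.count false ≤ f →
          (∀ u, vis1.getD u false = true → vis.getD u false = true ∨ Reach d graph N s u) →
          (∀ u, vis1.getD u false = true → vis.getD u false = false →
              u ≠ v →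
              ∀ tt, tt < N → (graph.getD u []).getD tt 0 ≠ 0 → (graph.getD u []).getD tt 0 < d →
                vis1.getD tt false = true) →
          (let res := ts.foldl
              (fun vis tt =>
                if vis.getD tt false = false ∧ (graph.getD v []).getD tt 0 ≠ 0 ∧ (graph.getD v []).getD tt 0 < d
                then dfsA d graph N f tt vis else vis) vis1
           res.length = N ∧
           (∀ i, vis1.getD i false = true → res.getD i false = true) ∧
           (∀ u, res.getD u false = true → vis1.getD u false = true ∨ Reach d graph N s u) ∧
           (∀ u, res.getD u false = true → vis.getD u false = false → u ≠ v →
              ∀ tt, tt < N → (graph.getD u []).getD tt 0 ≠ 0 → (graph.getD u []).getD tt 0 < d →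
                res.getD tt false = true) ∧
           (∀ t ∈ ts, (graph.getD v []).getD t 0 ≠ 0 → (graph.getD v []).getD t 0 < d →
              res.getD t false = true)) := by
      intro ts
      induction ts with
      | nil =>
        intro vis1 _ h1 _ _ hcd
        refine ⟨h1, fun i hi => hi, fun u hu => Or.inl hu, ?_, by simp⟩
        intro u hu hv0 hne; exact hcd u hu hv0 hne
      | cons t ts iht =>
        intro vis1 hts h1 hcnt hsound hcd
        have ht : t < N := hts t (by simp)
        by_cases hcond : vis1.getD t false = false ∧ (graph.getD v []).getD t 0 ≠ 0 ∧ (graph.getD v []).getD t 0 < d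
        · obtain ⟨htf, hw0, hwd⟩ := hcond
          have hrt : Reach d graph N s t := Reach.step hr ht hw0 hwd
          obtain ⟨a1, a2, a3, a4, a5⟩ := ih t vis1 h1 ht htf hcnt hrt
          set vis2 := dfsA d graph N f t vis1 with hvis2
          have hcnt2 : vis2.count false ≤ f :=
            le_trans (count_false_mono vis1 vis2 (h1.trans a1.symm) a2) hcnt
          have hsound2 : ∀ u, vis2.getD u false = true → vis.getD u false = true ∨ Reach d graph N s u := by
            intro u hu
            rcases a3 u hu with h | h
            · exact hsound u h
            · exact Or.inr h
          have hcd2 : ∀ u, vis2.getD u false = true → vis.getD u false = false → u ≠ v →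
              ∀ tt, tt < N → (graph.getD u []).getD tt 0 ≠ 0 → (graph.getD u []).getD tt 0 < d →
                vis2.getD tt false = true := by
            intro u hu hv0 hne tt hto w0 wd
            by_cases hu1 : vis1.getD u false = true
            · exact a2 tt (hcd u hu1 hv0 hne tt hto w0 wd)
            · exact a4 u hu (Bool.eq_false_iff.mpr hu1) tt hto w0 wd
          obtain ⟨b1, b2, b3, b4, b5⟩ := iht vis2 (fun x hx => hts x (by simp [hx])) a1 hcnt2 hsound2 hcd2
          have step_eq : (t :: ts).foldl
              (fun vis tt =>
                if vis.getD tt false = false ∧ (graph.getD v []).getD tt 0 ≠ 0 ∧ (graph.getD v []).getD tt 0 < d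
                then dfsA d graph N f tt vis else vis) vis1
              = ts.foldl
              (fun vis tt =>
                if vis.getD tt false = false ∧ (graph.getD v []).getD tt 0 ≠ 0 ∧ (graph.getD v []).getD tt 0 < d
                then dfsA d graph N f tt vis else vis) vis2 := by
            rw [List.foldl_cons]
            rw [if_pos (show vis1.getD t false = false ∧ (graph.getD v []).getD t 0 ≠ 0 ∧ (graph.getD v []).getD t 0 < d from ⟨htf, hw0, hwd⟩)]
          rw [step_eq]
          refine ⟨b1, fun i hi => b2 i (a2 i hi), ?_, b4, ?_⟩
          · intro u hu
            rcases b3 u hu with h | h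
            · exact a3 u h
            · exact Or.inr h
          · intro x hx w0 wd
            rcases List.mem_cons.mp hx with rfl | hx'
            · exact b2 x a5
            · exact b5 x hx' w0 wd
        · have step_eq : (t :: ts).foldl
              (fun vis tt =>
                if vis.getD tt false = false ∧ (graph.getD v []).getD tt 0 ≠ 0 ∧ (graph.getD v []).getD tt 0 < d
                then dfsA d graph N f tt vis else vis) vis1
              = ts.foldl
              (fun vis tt =>
                if vis.getD tt false = false ∧ (graph.getD v []).getD tt 0 ≠ 0 ∧ (graph.getD v []).getD tt 0 < d
                then dfsA d graph N f tt vis else vis) vis1 := by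
            rw [List.foldl_cons, if_neg hcond]
          rw [step_eq]
          obtain ⟨b1, b2, b3, b4, b5⟩ := iht vis1 (fun x hx => hts x (by simp [hx])) h1 hcnt hsound hcd
          refine ⟨b1, b2, b3, b4, ?_⟩
          intro x hx w0 wd
          rcases List.mem_cons.mp hx with rfl | hx'
          · have hxt : vis1.getD x false = true := by
              by_contra hne
              exact hcond ⟨Bool.eq_false_iff.mpr hne, w0, wd⟩
            exact b2 x hxt
          · exact b5 x hx' w0 wd
    have hset_len : (vis.set v true).length = N := by simp [hl]
    have hset_cnt : (vis.set v true).count false ≤ f := by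
      have := count_false_set vis v hvlen hfalse
      omega
    have hset_sound : ∀ u, (vis.set v true).getD u false = true →
        vis.getD u false = true ∨ Reach d graph N s u := by
      intro u hu
      by_cases huv : u = v
      · subst huv; exact Or.inr hr
      · exact Or.inl (by rwa [getD_set_ne vis v u true huv] at hu)
    have hset_cd : ∀ u, (vis.set v true).getD u false = true → vis.getD u false = false → u ≠ v →
        ∀ tt, tt < N → (graph.getD u []).getD tt 0 ≠ 0 → (graph.getD u []).getD tt 0 < d →
          (vis.set v true).getD tt false = true := by
      intro u hu hv0 hne tt _ _ _
      rw [getD_set_ne vis v u true hne] at hu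
      rw [hu] at hv0; exact absurd hv0 (by simp)
    obtain ⟨c1, c2, c3, c4, c5⟩ := fold (List.range N) (vis.set v true)
      (fun t ht => List.mem_range.mp ht) hset_len hset_cnt hset_sound hset_cd
    have hres : dfsA d graph N (f + 1) v vis = (List.range N).foldl
        (fun vis tt =>
          if vis.getD tt false = false ∧ (graph.getD v []).getD tt 0 ≠ 0 ∧ (graph.getD v []).getD tt 0 < d
          then dfsA d graph N f tt vis else vis) (vis.set v true) := rfl
    rw [hres]
    set res := (List.range N).foldl
        (fun vis tt =>
          if vis.getD tt false = false ∧ (graph.getD v []).getD tt 0 ≠ 0 ∧ (graph.getD v []).getD tt 0 < d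
          then dfsA d graph N f tt vis else vis) (vis.set v true) with hres2
    have hmark : res.getD v false = true := c2 v (getD_set_self vis v true hvlen)
    refine ⟨c1, ?_, ?_, ?_, hmark⟩
    · intro i hi
      by_cases hiv : i = v
      · subst hiv; exact hmark
      · exact c2 i (by rwa [getD_set_ne vis v i true hiv])
    · intro u hu
      rcases c3 u hu with h | h
      · exact hset_sound u h
      · exact Or.inr h
    · intro u hu hv0 tt hto w0 wd
      by_cases huv : u = v
      · subst huv
        exact c5 tt (List.mem_range.mpr hto) w0 wd
      · exact c4 u hu hv0 huv tt hto w0 wd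

-- A's final visited list marks exactly the reachable nodes
theorem dfsA_reach (d : Int) (graph : List (List Int)) (N s : Nat) (hs : s < N) :
    ∀ u, (dfsA d graph N (N + 1) s (List.replicate N false)).getD u false = true ↔ Reach d graph N s u := by
  have h0 : ∀ i, (List.replicate N false).getD i false = false := getD_replicate_false N
  obtain ⟨a1, a2, a3, a4, a5⟩ := dfsA_spec d graph N s (N + 1) s (List.replicate N false)
    (by simp) hs (h0 s) (by simp [List.count_replicate]) Reach.base
  intro u
  constructor
  · intro hu
    rcases a3 u hu with h | h
    · rw [h0 u] at h; exact absurd h (by simp)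
    · exact h
  · intro hr
    induction hr with
    | base => exact a5
    | step hv hto w0 wd ihv => exact a4 _ ihv (h0 _) _ hto w0 wd

-- specification of the inner loop of one BFS level (fold over candidate targets for a fixed source v)
theorem innerB_spec (d : Int) (graph : List (List Int)) (N v : Nat) :
    ∀ (ts : List Nat) (seen : List Bool) (acc : List Nat),
      (∀ t ∈ ts, t < N) → seen.length = N →
      (let res := ts.foldl (stepB d graph v) (seen, acc)
       res.1.length = N ∧
       (∀ i, seen.getD i false = true → res.1.getD i false = true) ∧
       (∀ u, res.1.getD u false = true → seen.getD u false = true ∨ (u < N ∧ Elig d graph v u)) ∧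
       (∀ u ∈ res.2, u ∈ acc ∨
          (u < N ∧ Elig d graph v u ∧ seen.getD u false = false ∧ res.1.getD u false = true)) ∧
       (∀ t ∈ ts, Elig d graph v t → res.1.getD t false = true) ∧
       (∀ u ∈ acc, u ∈ res.2) ∧
       (∀ u, res.1.getD u false = true → seen.getD u false = false → u ∈ res.2)) := by
  intro ts
  induction ts with
  | nil =>
    intro seen acc _ hl
    simp only [List.foldl_nil]
    refine ⟨hl, fun i hi => hi, fun u hu => Or.inl hu, fun u hu => Or.inl hu, by simp,
      fun u hu => hu, ?_⟩
    intro u hu hu0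
    rw [hu0] at hu; exact absurd hu (by simp)
  | cons t ts iht =>
    intro seen acc hts hl
    have ht : t < N := hts t (by simp)
    have htlen : t < seen.length := hl ▸ ht
    by_cases hcond : seen.getD t false = false ∧ (graph.getD v []).getD t 0 ≠ 0 ∧ (graph.getD v []).getD t 0 < d
    · obtain ⟨htf, hw0, hwd⟩ := hcond
      have hstep : (t :: ts).foldl (stepB d graph v) (seen, acc)
          = ts.foldl (stepB d graph v) (seen.set t true, acc ++ [t]) := by
        rw [List.foldl_cons]
        show ts.foldl (stepB d graph v) (stepB d graph v (seen, acc) t) = _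
        rw [stepB, if_pos ⟨htf, hw0, hwd⟩]
      rw [hstep]
      obtain ⟨b1, b2, b3, b4, b5, b6, b7⟩ := iht (seen.set t true) (acc ++ [t])
        (fun x hx => hts x (by simp [hx])) (by simp [hl])
      have hmono1 : ∀ i, seen.getD i false = true → (seen.set t true).getD i false = true := by
        intro i hi
        by_cases hit : i = t
        · subst hit; exact getD_set_self seen i true htlen
        · rwa [getD_set_ne seen t i true hit]
      refine ⟨b1, fun i hi => b2 i (hmono1 i hi), ?_, ?_, ?_, ?_, ?_⟩
      · intro u hu
        rcases b3 u hu with h | h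
        · by_cases hut : u = t
          · subst hut; exact Or.inr ⟨ht, hw0, hwd⟩
          · exact Or.inl (by rwa [getD_set_ne seen t u true hut] at h)
        · exact Or.inr h
      · intro u hu
        rcases b4 u hu with h | h
        · rcases List.mem_append.mp h with h' | h'
          · exact Or.inl h'
          · have hut : u = t := by simpa using h'
            subst hut
            exact Or.inr ⟨ht, ⟨hw0, hwd⟩, htf, b2 u (getD_set_self seen u true htlen)⟩
        · obtain ⟨huN, helig, hu0, hu1⟩ := h
          have hut : u ≠ t := by
            intro h'; subst h'
            rw [getD_set_self seen u true htlen] at hu0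
            exact absurd hu0 (by simp)
          rw [getD_set_ne seen t u true hut] at hu0
          exact Or.inr ⟨huN, helig, hu0, hu1⟩
      · intro x hx helig
        rcases List.mem_cons.mp hx with rfl | hx'
        · exact b2 x (getD_set_self seen x true htlen)
        · exact b5 x hx' helig
      · intro u hu
        exact b6 u (List.mem_append.mpr (Or.inl hu))
      · intro u hu hu0
        by_cases hut : u = t
        · subst hut
          exact b6 u (List.mem_append.mpr (Or.inr (by simp)))
        · refine b7 u hu ?_
          rwa [getD_set_ne seen t u true hut]
    · have hstep : (t :: ts).foldl (stepB d graph v) (seen, acc)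
          = ts.foldl (stepB d graph v) (seen, acc) := by
        rw [List.foldl_cons]
        show ts.foldl (stepB d graph v) (stepB d graph v (seen, acc) t) = _
        rw [stepB, if_neg hcond]
      rw [hstep]
      obtain ⟨b1, b2, b3, b4, b5, b6, b7⟩ := iht seen acc (fun x hx => hts x (by simp [hx])) hl
      refine ⟨b1, b2, b3, b4, ?_, b6, b7⟩
      intro x hx helig
      rcases List.mem_cons.mp hx with rfl | hx'
      · have hxt : seen.getD x false = true := by
          by_contra hne
          exact hcond ⟨Bool.eq_false_iff.mpr hne, helig.1, helig.2⟩
        exact b2 x hxt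
      · exact b5 x hx' helig

-- specification of one whole BFS level (fold over the frontier)
theorem levelB_spec (d : Int) (graph : List (List Int)) (N s : Nat) :
    ∀ (fr : List Nat) (seen : List Bool) (acc : List Nat),
      seen.length = N →
      (∀ v ∈ fr, v < N ∧ Reach d graph N s v) →
      (∀ u ∈ acc, u < N ∧ Reach d graph N s u ∧ seen.getD u false = true) →
      (let res := fr.foldl (fun st v => (List.range N).foldl (stepB d graph v) st) (seen, acc)
       res.1.length = N ∧
       (∀ i, seen.getD i false = true → res.1.getD i false = true) ∧
       (∀ u, res.1.getD u false = true → seen.getD u false = true ∨ Reach d graph N s u) ∧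
       (∀ u ∈ res.2, u < N ∧ Reach d graph N s u ∧ res.1.getD u false = true) ∧
       (∀ u ∈ res.2, u ∈ acc ∨ seen.getD u false = false) ∧
       (∀ v ∈ fr, ∀ tt, tt < N → Elig d graph v tt → res.1.getD tt false = true) ∧
       (∀ u ∈ acc, u ∈ res.2) ∧
       (∀ u, res.1.getD u false = true → seen.getD u false = false → u ∈ res.2)) := by
  intro fr
  induction fr with
  | nil =>
    intro seen acc hl _ hacc
    simp only [List.foldl_nil]
    refine ⟨hl, fun i hi => hi, fun u hu => Or.inl hu,
      fun u hu => ⟨(hacc u hu).1, (hacc u hu).2.1, (hacc u hu).2.2⟩,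
      fun u hu => Or.inl hu, by simp, fun u hu => hu, ?_⟩
    intro u hu hu0
    rw [hu0] at hu; exact absurd hu (by simp)
  | cons v fr ihf =>
    intro seen acc hl hfr hacc
    obtain ⟨hvN, hvr⟩ := hfr v (by simp)
    obtain ⟨i1, i2, i3, i4, i5, i6, i7⟩ := innerB_spec d graph N v (List.range N) seen acc
      (fun t htm => List.mem_range.mp htm) hl
    set st1 := (List.range N).foldl (stepB d graph v) (seen, acc) with hst1
    have hstep : (v :: fr).foldl (fun st v => (List.range N).foldl (stepB d graph v) st) (seen, acc)
        = fr.foldl (fun st v => (List.range N).foldl (stepB d graph v) st) st1 := by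
      rw [List.foldl_cons]
    have hacc1 : ∀ u ∈ st1.2, u < N ∧ Reach d graph N s u ∧ st1.1.getD u false = true := by
      intro u hu
      rcases i4 u hu with h | h
      · obtain ⟨huN, hur, hus⟩ := hacc u h
        exact ⟨huN, hur, i2 u hus⟩
      · obtain ⟨huN, helig, _, hu1⟩ := h
        exact ⟨huN, Reach.step hvr huN helig.1 helig.2, hu1⟩
    have hst1p : st1 = (st1.1, st1.2) := rfl
    obtain ⟨j1, j2, j3, j4, j5, j6, j7, j8⟩ := ihf st1.1 st1.2 i1
      (fun x hx => hfr x (by simp [hx])) hacc1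
    rw [hstep, ← hst1p] at *
    rw [hstep]
    have hres_eq : fr.foldl (fun st v => (List.range N).foldl (stepB d graph v) st) st1
        = fr.foldl (fun st v => (List.range N).foldl (stepB d graph v) st) (st1.1, st1.2) := by
      rw [← hst1p]
    rw [hres_eq]
    refine ⟨j1, fun i hi => j2 i (i2 i hi), ?_, j4, ?_, ?_, ?_, ?_⟩
    · intro u hu
      rcases j3 u hu with h | h
      · rcases i3 u h with h' | h'
        · exact Or.inl h'
        · exact Or.inr (Reach.step hvr h'.1 h'.2.1 h'.2.2)
      · exact Or.inr h
    · intro u hu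
      rcases j5 u hu with h | h
      · rcases i4 u h with h' | h'
        · exact Or.inl h'
        · exact Or.inr h'.2.2.1
      · by_cases hu0 : seen.getD u false = true
        · rw [i2 u hu0] at h; exact absurd h (by simp)
        · exact Or.inr (Bool.eq_false_iff.mpr hu0)
    · intro x hx tt htt helig
      rcases List.mem_cons.mp hx with rfl | hx'
      · exact j2 tt (i5 tt (List.mem_range.mpr htt) helig)
      · exact j6 x hx' tt htt helig
    · intro u hu
      exact j7 u (i6 u hu)
    · intro u hu hu0
      by_cases hu1 : st1.1.getD u false = true
      · exact j7 u (i7 u hu1 hu0)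
      · refine j8 u hu (Bool.eq_false_iff.mpr hu1)

-- specification of Source B's while loop
theorem bfsLoop_spec (d : Int) (graph : List (List Int)) (N s : Nat) :
    ∀ (f : Nat) (seen : List Bool) (frontier : List Nat),
      seen.length = N →
      (∀ v ∈ frontier, v < N ∧ Reach d graph N s v ∧ seen.getD v false = true) →
      (∀ u, seen.getD u false = true →
          u ∈ frontier ∨ (∀ tt, tt < N → Elig d graph u tt → seen.getD tt false = true)) →
      seen.count false + 2 ≤ f →
      (let res := bfsLoop d graph N f seen frontier
       res.length = N ∧
       (∀ i, seen.getD i false = true → res.getD i false = true) ∧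
       (∀ u, res.getD u false = true → seen.getD u false = true ∨ Reach d graph N s u) ∧
       (∀ u, res.getD u false = true → ∀ tt, tt < N → Elig d graph u tt → res.getD tt false = true)) := by
  intro f
  induction f with
  | zero =>
    intro seen frontier _ _ _ hc
    exact absurd hc (by omega)
  | succ f ih =>
    intro seen frontier hl hfr hclosed hc
    cases frontier with
    | nil =>
      have hres : bfsLoop d graph N (f + 1) seen [] = seen := by
        simp [bfsLoop]
      rw [hres]
      refine ⟨hl, fun i hi => hi, fun u hu => Or.inl hu, ?_⟩
      intro u hu tt htt helig
      rcases hclosed u hu with h | h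
      · exact absurd h (by simp)
      · exact h tt htt helig
    | cons v rest =>
      have hres : bfsLoop d graph N (f + 1) seen (v :: rest) =
          bfsLoop d graph N f (bfsLevel d graph N (v :: rest) seen).1
            (bfsLevel d graph N (v :: rest) seen).2 := by
        simp [bfsLoop]
      rw [hres]
      rw [bfsLevel_eq]
      obtain ⟨L1, L2, L3, L4, L5, L6, L7, L8⟩ := levelB_spec d graph N s (v :: rest) seen []
        hl (fun x hx => ⟨(hfr x hx).1, (hfr x hx).2.1⟩) (by simp)
      set st := (v :: rest).foldl (fun st v => (List.range N).foldl (stepB d graph v) st) (seen, ([] : List Nat)) with hst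
      have hclosed1 : ∀ u, st.1.getD u false = true →
          u ∈ st.2 ∨ (∀ tt, tt < N → Elig d graph u tt → st.1.getD tt false = true) := by
        intro u hu
        by_cases hu0 : seen.getD u false = true
        · rcases hclosed u hu0 with h | h
          · exact Or.inr (fun tt htt helig => L6 u h tt htt helig)
          · exact Or.inr (fun tt htt helig => L2 tt (h tt htt helig))
        · exact Or.inl (L8 u hu (Bool.eq_false_iff.mpr hu0))
      have hfr1 : ∀ x ∈ st.2, x < N ∧ Reach d graph N s x ∧ st.1.getD x false = true := L4
      cases hst2 : st.2 with
      | nil =>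
        have hres2 : bfsLoop d graph N f st.1 [] = st.1 := by
          cases f <;> simp [bfsLoop]
        rw [hres2]
        refine ⟨L1, L2, L3, ?_⟩
        intro u hu tt htt helig
        rcases hclosed1 u hu with h | h
        · rw [hst2] at h; exact absurd h (by simp)
        · exact h tt htt helig
      | cons u0 rest0 =>
        rw [← hst2]
        have hu0 : u0 ∈ st.2 := by rw [hst2]; simp
        obtain ⟨hu0N, _, hu0m⟩ := hfr1 u0 hu0
        have hu0f : seen.getD u0 false = false := by
          rcases L5 u0 hu0 with h | h
          · exact absurd h (by simp)
          · exact h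
        have hstrict : st.1.count false < seen.count false :=
          count_false_strict seen st.1 (hl.trans L1.symm) L2 u0 (hl ▸ hu0N) hu0f hu0m
        obtain ⟨M1, M2, M3, M4⟩ := ih st.1 st.2 L1 hfr1 hclosed1 (by omega)
        refine ⟨M1, fun i hi => M2 i (L2 i hi), ?_, M4⟩
        intro u hu
        rcases M3 u hu with h | h
        · exact L3 u h
        · exact Or.inr h
 
-- B's final seen list marks exactly the reachable nodes
theorem bfs_reach (d : Int) (graph : List (List Int)) (N s : Nat) (hs : s < N) :
    ∀ u, (bfsLoop d graph N (N + 1) ((List.replicate N false).set s true) [s]).getD u false = true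
      ↔ Reach d graph N s u := by
  have hslen : s < (List.replicate N false).length := by simpa using hs
  have hseen0 : ((List.replicate N false).set s true).getD s false = true :=
    getD_set_self (List.replicate N false) s true hslen
  have honly : ∀ u, ((List.replicate N false).set s true).getD u false = true → u = s := by
    intro u hu
    by_contra hne
    rw [getD_set_ne (List.replicate N false) s u true hne, getD_replicate_false] at hu
    exact absurd hu (by simp)
  have hcnt : ((List.replicate N false).set s true).count false + 2 ≤ N + 1 := by
    have := count_false_set (List.replicate N false) s hslen (getD_replicate_false N s)
    have hrep : (List.replicate N false).count false = N := by simp [List.count_replicate]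
    omega
  obtain ⟨B1, B2, B3, B4⟩ := bfsLoop_spec d graph N s (N + 1)
    ((List.replicate N false).set s true) [s] (by simpa using hslen)
    (by intro x hx; simp at hx; subst hx; exact ⟨hs, Reach.base, hseen0⟩)
    (by intro u hu; exact Or.inl (by simp [honly u hu]))
    hcnt
  intro u
  constructor
  · intro hu
    rcases B3 u hu with h | h
    · rw [honly u h]; exact Reach.base
    · exact h
  · intro hr
    induction hr with
    | base => exact B2 s hseen0
    | step hv hto w0 wd ihv => exact B4 _ ihv _ hto ⟨w0, wd⟩

-- ===== VERDICT (by name: the statement is the Claim_ definition above) =====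
theorem check_diameter_spec : Claim_equal_check_diameter := by
  intro d graph n _ hpre
  unfold Spec_check_diameter check_diameter check_diameter_alt
  have hn : -1 ≤ n := by
    rcases hpre with h | h | h
    · omega
    · omega
    · omega
  set N := (n + 2).toNat with hN
  have hsN : n.toNat < N := by omega
  have hA := dfsA_reach d graph N n.toNat hsN
  have hB := bfs_reach d graph N n.toNat hsN
  have key : (dfsA d graph N (N + 1) n.toNat (List.replicate N false)).getD (n + 1).toNat false
      = (bfsLoop d graph N (N + 1) ((List.replicate N false).set n.toNat true) [n.toNat]).getD (n + 1).toNat false := by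
    have := (hA (n + 1).toNat).trans (hB (n + 1).toNat).symm
    cases hA' : (dfsA d graph N (N + 1) n.toNat (List.replicate N false)).getD (n + 1).toNat false with
    | true => exact (this.mp hA').symm
    | false =>
      cases hB' : (bfsLoop d graph N (N + 1) ((List.replicate N false).set n.toNat true) [n.toNat]).getD (n + 1).toNat false with
      | false => rfl
      | true => rw [this.mpr hB'] at hA'; exact absurd hA' (by simp)
  simp only [key]
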